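-- pv_equiv track=rewrite | github.com/microsoft/knossos-ksc | rlo/users/jackd/async_search/main.py | merge_round_robin
-- ===== SOURCE A (Python) =====
-- from typing import Any, Callable, Dict, Optional, Sequence
--
-- def merge_round_robin(split_values: Sequence[Sequence]):
--     """
--     Merge results corresponding to splits from `split_round_robin`.
--
--     ```python
--     merge_round_robin([[0, 3, 6, 9], [1, 4, 7], [2, 5, 8]]) == list(range(10))
--     ```
--     """
--     out = []
--     max_len = max(len(v) for v in split_values)
--     for i in range(max_len):
--         for vals in split_values:
--             if i == len(vals):
--                 return out
--             out.append(vals[i])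
--     return out
-- ===== SOURCE B (Python) =====
-- def merge_round_robin(split_values):
--     # Closed-form: A's loop stops at column m = min length, after emitting the
--     # first j elements of that column, where j = index of first minimal list.
--     m = min(len(v) for v in split_values)
--     j = next(i for i, v in enumerate(split_values) if len(v) == m)
--     out = [v[i] for i in range(m) for v in split_values]
--     out.extend(v[m] for v in split_values[:j])
--     return out
-- ===== Notes on version B (the rewrite author's own statement) =====
-- stated objective: alternative
-- what changed: Instead of A's nested loops that scan column by column and early-return when a list runs out, B computes the stopping point in closed form first (m = min length, j = index of the first minimal-length list) and then builds the result directly as m full columns plus the first j elements of column m.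
-- outside the precondition, e.g. on merge_round_robin([]): A raises ValueError, B raises ValueError
import Mathlib
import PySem

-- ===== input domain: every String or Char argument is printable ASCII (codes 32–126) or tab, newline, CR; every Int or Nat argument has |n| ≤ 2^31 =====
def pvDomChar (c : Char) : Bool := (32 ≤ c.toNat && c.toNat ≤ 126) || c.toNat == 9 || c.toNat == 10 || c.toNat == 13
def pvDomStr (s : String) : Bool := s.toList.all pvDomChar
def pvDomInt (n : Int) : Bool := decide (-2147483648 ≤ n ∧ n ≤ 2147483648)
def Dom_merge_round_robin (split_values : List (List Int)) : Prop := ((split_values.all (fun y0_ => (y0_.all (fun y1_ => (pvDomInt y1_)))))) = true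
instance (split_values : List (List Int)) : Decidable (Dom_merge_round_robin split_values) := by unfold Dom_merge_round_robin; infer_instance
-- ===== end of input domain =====

-- B replaces A's scan-until-exhausted nested loops by computing the stopping point in
-- closed form first (min length m and the index j of the first minimal-length list),
-- then building the output directly; same cost, no early-exit machinery ("alternative").

-- ===== PORT A =====
-- inner 'for vals in split_values' loop; .error = the early 'return out', .ok = fall through.
-- 'vals[i]' is ported as 'vals.getD i 0': inside merge_round_robin the index is always in range
-- (the loop returns as soon as i reaches the length of any list), so this is exact.
def mrrInner (i : Nat) : List (List Int) → List Int → Except (List Int) (List Int)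
  | [], out => .ok out
  | vals :: rest, out =>
    if i = vals.length then .error out
    else mrrInner i rest (out ++ [vals.getD i 0])

-- outer 'for i in range(max_len)' loop
def mrrOuter (split_values : List (List Int)) : List Nat → List Int → List Int
  | [], out => out
  | i :: is, out =>
    match mrrInner i split_values out with
    | .error r => r
    | .ok out' => mrrOuter split_values is out'

def merge_round_robin (split_values : List (List Int)) : List Int :=
  match (split_values.map List.length).max? with
  | none => []   -- Python's max raises ValueError here (split_values = []); excluded by Pre_
  | some max_len => mrrOuter split_values (List.range max_len) []

-- ===== PORT B =====
-- m = min(len(v) for v in split_values); j = first index with len == m;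
-- [v[i] for i in range(m) for v in split_values] ↦ flatMap of full columns;
-- [v[m] for v in split_values[:j]] ↦ map over take j.  v[i]/v[m] are always in
-- range (i < m ≤ len v; lists before index j have length > m), so getD is exact.
def merge_round_robin_alt (split_values : List (List Int)) : List Int :=
  match (split_values.map List.length).min? with
  | none => []   -- Source B's min raises ValueError here (split_values = []); excluded by Pre_
  | some m =>
    let j := split_values.findIdx (fun v => v.length == m)
    ((List.range m).flatMap (fun i => split_values.map (fun v => v.getD i 0)))
      ++ (split_values.take j).map (fun v => v.getD m 0)

-- ===== PRECONDITION & SPEC =====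
-- Pre_ excludes only split_values = [], on which both Pythons raise ValueError.
def Pre_merge_round_robin (split_values : List (List Int)) : Prop := split_values ≠ []
instance (split_values : List (List Int)) : Decidable (Pre_merge_round_robin split_values) := by unfold Pre_merge_round_robin; infer_instance
def pvWitness_merge_round_robin : List (List Int) := [[0, 3, 6], [1, 4], [2, 5]]

def Spec_merge_round_robin (split_values : List (List Int)) (out : List Int) : Prop := out = merge_round_robin_alt split_values
instance (split_values : List (List Int)) (out : List Int) : Decidable (Spec_merge_round_robin split_values out) := by unfold Spec_merge_round_robin; infer_instance

-- ===== CLAIM (what is proved, stated in full; the proofs are below) =====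
def Claim_equal_merge_round_robin : Prop := ∀ (split_values : List (List Int)), Dom_merge_round_robin split_values → Pre_merge_round_robin split_values → Spec_merge_round_robin split_values (merge_round_robin split_values)

-- ===== LEMMAS AND PROOFS =====

-- inner loop, completed case: every list still has an element at index i
lemma mrrInner_ok (i : Nat) :
    ∀ (l : List (List Int)), (∀ v ∈ l, i < v.length) →
      ∀ out, mrrInner i l out = .ok (out ++ l.map (fun v => v.getD i 0)) := by
  intro l
  induction l with
  | nil => intro _ out; simp [mrrInner]
  | cons v l ih =>
    intro h out
    have hv : i < v.length := h v (by simp)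
    simp only [mrrInner, if_neg (show ¬ i = v.length by omega)]
    rw [ih (fun u hu => h u (by simp [hu]))]
    simp

-- inner loop, early-return case: some list is exhausted at index i; the loop emits the
-- elements of the lists strictly before the first exhausted one, then returns.
lemma mrrInner_err (i : Nat) :
    ∀ (l : List (List Int)), (∀ v ∈ l, i ≤ v.length) → (∃ v ∈ l, v.length = i) →
      ∀ out, mrrInner i l out =
        .error (out ++ (l.take (l.findIdx (fun v => v.length == i))).map (fun v => v.getD i 0)) := by
  intro l
  induction l with
  | nil => rintro _ ⟨v, hv, _⟩ _; simp at hv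
  | cons v l ih =>
    intro hle hex out
    by_cases hv : v.length = i
    · simp [mrrInner, hv, List.findIdx_cons]
    · have hvi : i < v.length := lt_of_le_of_ne (hle v (by simp)) (fun h => hv h.symm)
      have hex' : ∃ u ∈ l, u.length = i := by
        rcases hex with ⟨u, hu, he⟩
        rcases List.mem_cons.mp hu with h1 | h2
        · exact absurd (h1 ▸ he) hv
        · exact ⟨u, h2, he⟩
      simp only [mrrInner, if_neg (show ¬ i = v.length by omega)]
      rw [ih (fun u hu => hle u (by simp [hu])) hex']
      have hb : (v.length == i) = false := by simp [hv]
      simp [List.findIdx_cons, hb]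

-- outer loop through columns i, …, i+k-1, none of which exhausts any list: the loop
-- appends the full columns and continues with the rest of the index list.
lemma mrrOuter_chain (split_values : List (List Int)) :
    ∀ (k i : Nat) (rest : List Nat) (out : List Int), (∀ v ∈ split_values, i + k ≤ v.length) →
      mrrOuter split_values (List.range' i k ++ rest) out =
        mrrOuter split_values rest
          (out ++ (List.range' i k).flatMap (fun idx => split_values.map (fun v => v.getD idx 0))) := by
  intro k
  induction k with
  | zero => intro i rest out _; simp
  | succ k ih =>
    intro i rest out h
    rw [List.range'_succ]
    simp only [List.cons_append, mrrOuter,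
      mrrInner_ok i split_values (fun v hv => by have := h v hv; omega) out]
    rw [ih (i + 1) rest _ (fun v hv => by have := h v hv; omega)]
    simp [List.flatMap_cons]

-- ===== VERDICT (by name: the statement is the Claim_ definition above) =====
theorem merge_round_robin_spec : Claim_equal_merge_round_robin := by
  intro sv _ hpre
  unfold Spec_merge_round_robin merge_round_robin merge_round_robin_alt
  have hne : sv.map List.length ≠ [] := by simpa using hpre
  cases hM : (sv.map List.length).max? with
  | none => exact absurd (List.max?_eq_none_iff.mp hM) hne
  | some M =>
  cases hm : (sv.map List.length).min? with
  | none => exact absurd (List.min?_eq_none_iff.mp hm) hne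
  | some m =>
  dsimp only
  obtain ⟨hmMem, hmLe⟩ := List.min?_eq_some_iff.mp hm
  obtain ⟨_, hMGe⟩ := List.max?_eq_some_iff.mp hM
  have hmLe' : ∀ v ∈ sv, m ≤ v.length := by
    intro v hv; exact hmLe _ (List.mem_map_of_mem hv)
  have hmM : m ≤ M := hMGe _ hmMem
  by_cases hEq : m = M
  · -- every list has length m = M: the loop runs all M columns and never early-returns;
    -- B's tail is empty because the very first list already has minimal length.
    subst hEq
    have hall : ∀ v ∈ sv, v.length = m := by
      intro v hv
      have h1 := hmLe' v hv
      have h2 := hMGe _ (List.mem_map_of_mem hv)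
      omega
    have := mrrOuter_chain sv m 0 [] []
      (fun v hv => by have := hall v hv; omega)
    simp only [List.append_nil] at this
    rw [List.range_eq_range', this]
    obtain ⟨v0, t, rfl⟩ := List.exists_cons_of_ne_nil hpre
    have : List.findIdx (fun v => v.length == m) (v0 :: t) = 0 := by
      simp [List.findIdx_cons, hall v0 (by simp)]
    simp [mrrOuter, this]
  · -- m < M: the loop runs columns 0..m-1 fully, then stops inside column m
    have hmM' : m < M := lt_of_le_of_ne hmM hEq
    have hsplit : List.range M = List.range' 0 m ++ (m :: List.range' (m + 1) (M - m - 1)) := by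
      rw [List.range_eq_range']
      have h1 : List.range' m (M - m) = m :: List.range' (m + 1) (M - m - 1) := by
        have he : M - m = (M - m - 1) + 1 := by omega
        rw [he, List.range'_succ]
        simp
      rw [← h1]
      have h2 := List.range'_append (s := 0) (m := m) (n := M - m) (step := 1)
      simp only [Nat.zero_add, Nat.one_mul] at h2
      rw [h2]
      congr 1
      omega
    rw [hsplit, mrrOuter_chain sv m 0 _ [] (fun v hv => by have := hmLe' v hv; omega)]
    have hex : ∃ v ∈ sv, v.length = m := by
      rcases List.mem_map.mp hmMem with ⟨v, hv, he⟩
      exact ⟨v, hv, he⟩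
    simp only [mrrOuter, mrrInner_err m sv hmLe' hex _]
    simp [List.range_eq_range']
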